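-- pv_equiv track=rewrite | github.com/twongCMU/AdventOfCode2023 | 12/part1.py | verify_data
-- ===== SOURCE A (Python) =====
-- def verify_data(data, groups):
--     d = data.split(".")
--     d_filtered = []
--     for d_one  in d:
--         if len(d_one) >= 1:
--             d_filtered.append(d_one)
--
--     g = [int(x) for x in groups.split(",")]
--
--     if len(g) != len(d_filtered):
--         return False
--
--
--     for i, one_group in enumerate(g):
--         if len(d_filtered[i]) != g[i]:
--             return False
--
--     return True
-- ===== SOURCE B (Python) =====
-- def verify_data(data, groups):
--     g = [int(x) for x in groups.split(",")]
--     idx = 0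
--     run = 0
--     for ch in data + ".":
--         if ch == ".":
--             if run != 0:
--                 if idx >= len(g) or g[idx] != run:
--                     return False
--                 idx += 1
--                 run = 0
--         else:
--             run += 1
--     return idx == len(g)
-- ===== Notes on version B (the rewrite author's own statement) =====
-- stated objective: alternative
-- what changed: Instead of splitting data on '.', building a filtered list of nonempty pieces and then comparing its lengths index-by-index against the parsed group list, B makes one character pass over data plus a '.' sentinel, maintaining a running run-length and an index into the parsed groups, matching each run as it closes.
import Mathlib
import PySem

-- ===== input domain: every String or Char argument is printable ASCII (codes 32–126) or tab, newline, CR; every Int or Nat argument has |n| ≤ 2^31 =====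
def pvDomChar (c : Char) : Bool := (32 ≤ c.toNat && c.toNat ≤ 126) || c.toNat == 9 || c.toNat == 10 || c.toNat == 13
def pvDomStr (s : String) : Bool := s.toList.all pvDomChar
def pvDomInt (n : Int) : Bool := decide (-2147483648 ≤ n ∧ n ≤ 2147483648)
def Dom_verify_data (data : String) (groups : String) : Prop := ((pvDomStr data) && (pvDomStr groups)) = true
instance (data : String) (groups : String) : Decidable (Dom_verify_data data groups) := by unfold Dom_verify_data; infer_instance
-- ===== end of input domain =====

-- B replaces A's split/filter/index-compare with a single character scan that matches each
-- contiguous '#'-run against the parsed group list as the run closes (objective: alternative).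

-- ===== PORT A =====
-- [int(x) for x in pieces]: left-to-right; none = the ValueError int(x) raises on the first bad piece
def pvParseInts : List (List Char) → Option (List Int)
  | [] => some []
  | x :: xs =>
    match PySem.Int.ofChars? x, pvParseInts xs with
    | some v, some vs => some (v :: vs)
    | _, _ => none

-- 'for i, one_group in enumerate(g): if len(d_filtered[i]) != g[i]: return False'
def pvALoop (g : List Int) (df : List (List Char)) : List (Int × Int) → Bool
  | [] => true
  | (i, _) :: rest =>
    if ((PySem.List.pyGetD df i []).length : Int) ≠ PySem.List.pyGetD g i 0 then false
    else pvALoop g df rest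

-- strings handled as List Char via .toList (PySem.Chars.splitOn is the exact s.split(sep) for sep ≠ "")
def verify_data (data : String) (groups : String) : Bool :=
  let d := PySem.Chars.splitOn data.toList ['.']
  let d_filtered := d.foldl (fun acc x => if 1 ≤ x.length then acc ++ [x] else acc) []
  match pvParseInts (PySem.Chars.splitOn groups.toList [',']) with
  | none => false   -- outside Pre_: Python raises ValueError here
  | some g =>
    if (g.length : Int) ≠ (d_filtered.length : Int) then false
    else pvALoop g d_filtered (PySem.List.enumerate g 0)

-- ===== PORT B =====
-- the single pass of Source B: run = current run length, idx = position in g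
def pvBLoop (g : List Int) : List Char → Nat → Int → Bool
  | [], idx, _run => decide ((idx : Int) = (g.length : Int))
  | c :: cs, idx, run =>
    if c = '.' then
      if run ≠ 0 then
        if g.length ≤ idx ∨ PySem.List.pyGetD g (idx : Int) 0 ≠ run then false
        else pvBLoop g cs (idx + 1) 0
      else pvBLoop g cs idx run
    else pvBLoop g cs idx (run + 1)

def verify_data_alt (data : String) (groups : String) : Bool :=
  match pvParseInts (PySem.Chars.splitOn groups.toList [',']) with
  | none => false   -- outside Pre_: Source B raises the same ValueError
  | some g => pvBLoop g (data.toList ++ ['.']) 0 0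

-- ===== PRECONDITION & SPEC =====
-- Pre_ excludes exactly the inputs where int(x) raises ValueError on a comma piece of groups
-- (both A and B raise there).
def Pre_verify_data (data : String) (groups : String) : Prop :=
  ∀ x ∈ PySem.Chars.splitOn groups.toList [','], (PySem.Int.ofChars? x).isSome = true
instance (data : String) (groups : String) : Decidable (Pre_verify_data data groups) := by
  unfold Pre_verify_data; infer_instance

def pvWitness_verify_data : String × String := ("#.##", "1,2")

def Spec_verify_data (data : String) (groups : String) (out : Bool) : Prop := out = verify_data_alt data groups
instance (data : String) (groups : String) (out : Bool) : Decidable (Spec_verify_data data groups out) := by unfold Spec_verify_data; infer_instance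

-- ===== CLAIM (what is proved, stated in full; the proofs are below) =====
def Claim_equal_verify_data : Prop := ∀ (data : String) (groups : String), Dom_verify_data data groups → Pre_verify_data data groups → Spec_verify_data data groups (verify_data data groups)

-- ===== LEMMAS AND PROOFS =====

-- pure structural split on '.' (proof-side mirror of PySem.Chars.splitOn with a one-char sep)
def pvConsHead (p : List Char) : List (List Char) → List (List Char)
  | [] => [p]
  | h :: t => (p ++ h) :: t

def pvSplitDot : List Char → List (List Char)
  | [] => [[]]
  | c :: cs => if c = '.' then [] :: pvSplitDot cs else pvConsHead [c] (pvSplitDot cs)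

lemma pvSplitDot_ne_nil (cs : List Char) : pvSplitDot cs ≠ [] := by
  cases cs with
  | nil => simp [pvSplitDot]
  | cons c cs =>
    simp only [pvSplitDot]
    split_ifs
    · simp
    · cases h : pvSplitDot cs <;> simp [pvConsHead]

lemma pvGo_eq (cs : List Char) : ∀ (n : Nat) (cur : List Char) (acc : List (List Char)),
    cs.length ≤ n →
    PySem.Chars.splitOn.go ['.'] (n + 1) cs cur acc
      = acc.reverse ++ pvConsHead cur.reverse (pvSplitDot cs) := by
  induction cs with
  | nil =>
    intro n cur acc _
    simp [PySem.Chars.splitOn.go, pvSplitDot, pvConsHead]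
  | cons c cs ih =>
    intro n cur acc hn
    obtain ⟨m, rfl⟩ : ∃ m, n = m + 1 := ⟨n - 1, by simp at hn; omega⟩
    by_cases hc : c = '.'
    · subst hc
      have hpre : List.isPrefixOf ['.'] ('.' :: cs) = true := by simp [List.isPrefixOf]
      rw [show PySem.Chars.splitOn.go ['.'] (m + 1 + 1) ('.' :: cs) cur acc
            = PySem.Chars.splitOn.go ['.'] (m + 1) (List.drop 1 ('.' :: cs)) [] (cur.reverse :: acc) from by
            simp [PySem.Chars.splitOn.go, hpre]]
      rw [List.drop_one, List.tail_cons, ih m [] (cur.reverse :: acc) (by simp at hn; omega)]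
      have h2 : pvConsHead [] (pvSplitDot cs) = pvSplitDot cs := by
        cases h : pvSplitDot cs with
        | nil => exact absurd h (pvSplitDot_ne_nil cs)
        | cons a t => simp [pvConsHead]
      rw [show pvSplitDot ('.' :: cs) = [] :: pvSplitDot cs from by simp [pvSplitDot]]
      simp only [List.reverse_nil] at *
      rw [h2]
      simp [pvConsHead]
    · have hpre : List.isPrefixOf ['.'] (c :: cs) = false := by
        simp [List.isPrefixOf]; exact fun h => hc h.symm
      rw [show PySem.Chars.splitOn.go ['.'] (m + 1 + 1) (c :: cs) cur acc
            = PySem.Chars.splitOn.go ['.'] (m + 1) cs (c :: cur) acc from by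
            simp [PySem.Chars.splitOn.go, hpre]]
      rw [ih m (c :: cur) acc (by simp at hn; omega)]
      have : pvSplitDot (c :: cs) = pvConsHead [c] (pvSplitDot cs) := by simp [pvSplitDot, hc]
      rw [this]
      cases h : pvSplitDot cs with
      | nil => exact absurd h (pvSplitDot_ne_nil cs)
      | cons a t => simp [pvConsHead]

lemma pvSplitOn_dot (cs : List Char) : PySem.Chars.splitOn cs ['.'] = pvSplitDot cs := by
  show PySem.Chars.splitOn.go ['.'] (cs.length + 1) cs [] [] = pvSplitDot cs
  rw [pvGo_eq cs cs.length [] [] le_rfl]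
  cases h : pvSplitDot cs with
  | nil => exact absurd h (pvSplitDot_ne_nil cs)
  | cons a t => simp [pvConsHead]

-- run lengths of cs given a pending run of length `run`
def pvLens : Int → List Char → List Int
  | run, [] => if run ≠ 0 then [run] else []
  | run, c :: cs => if c = '.' then (if run ≠ 0 then run :: pvLens 0 cs else pvLens 0 cs) else pvLens (run + 1) cs

def pvPrep (v : Int) (ls : List Int) : List Int := if v ≠ 0 then v :: ls else ls

def pvLenInt (x : List Char) : Int := (x.length : Int)

lemma pvFM_cons (a : List Char) (t : List (List Char)) :
    (List.filter (fun x => decide (1 ≤ x.length)) (a :: t)).map pvLenInt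
      = pvPrep ((a.length : Int)) ((List.filter (fun x => decide (1 ≤ x.length)) t).map pvLenInt) := by
  by_cases ha : 1 ≤ a.length
  · rw [List.filter_cons_of_pos (by simpa using ha)]
    have : ((a.length : Int)) ≠ 0 := by exact_mod_cast (by omega : a.length ≠ 0)
    simp only [pvPrep, if_pos this, List.map_cons, pvLenInt]
  · rw [List.filter_cons_of_neg (by simpa using ha)]
    have : a.length = 0 := by omega
    simp [pvPrep, this]

lemma pvLens_spec (cs : List Char) : ∀ (run : Int), 0 ≤ run →
    pvLens run cs
      = pvPrep (run + ((pvSplitDot cs).headI.length : Int))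
          (((pvSplitDot cs).tail.filter (fun x => decide (1 ≤ x.length))).map pvLenInt) := by
  induction cs with
  | nil => intro run _; simp [pvLens, pvSplitDot, pvPrep]
  | cons c cs ih =>
    intro run hrun
    by_cases hc : c = '.'
    · subst hc
      have hcore : pvLens 0 cs
          = ((pvSplitDot cs).filter (fun x => decide (1 ≤ x.length))).map pvLenInt := by
        rw [ih 0 le_rfl]
        cases h : pvSplitDot cs with
        | nil => exact absurd h (pvSplitDot_ne_nil cs)
        | cons a t => rw [pvFM_cons]; simp
      simp only [pvSplitDot, if_pos rfl, pvLens]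
      simp only [List.headI, List.tail_cons]
      rw [hcore]
      simp [pvPrep]
    · simp only [pvSplitDot, if_neg hc, pvLens]
      rw [ih (run + 1) (by omega)]
      cases h : pvSplitDot cs with
      | nil => exact absurd h (pvSplitDot_ne_nil cs)
      | cons a t =>
        simp only [pvConsHead, List.headI, List.tail_cons]
        congr 1
        simp only [List.singleton_append, List.length_cons]
        push_cast
        ring

lemma pvLens_zero (cs : List Char) :
    pvLens 0 cs = ((pvSplitDot cs).filter (fun x => decide (1 ≤ x.length))).map pvLenInt := by
  rw [pvLens_spec cs 0 le_rfl]
  cases h : pvSplitDot cs with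
  | nil => exact absurd h (pvSplitDot_ne_nil cs)
  | cons a t => rw [pvFM_cons]; simp

-- the index/rest check both loops reduce to
def pvChk (g : List Int) : Nat → List Int → Bool
  | idx, [] => decide ((idx : Int) = (g.length : Int))
  | idx, l :: ls =>
    if g.length ≤ idx ∨ PySem.List.pyGetD g (idx : Int) 0 ≠ l then false
    else pvChk g (idx + 1) ls

lemma pvBLoop_eq_chk (g : List Int) (cs : List Char) : ∀ (idx : Nat) (run : Int),
    pvBLoop g (cs ++ ['.']) idx run = pvChk g idx (pvLens run cs) := by
  induction cs with
  | nil =>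
    intro idx run
    show pvBLoop g ['.'] idx run = _
    by_cases hr : run ≠ 0
    · rw [show pvBLoop g ['.'] idx run
          = (if g.length ≤ idx ∨ PySem.List.pyGetD g (idx : Int) 0 ≠ run then false
             else pvBLoop g [] (idx + 1) 0) from by
          simp only [pvBLoop, reduceIte, if_pos hr]]
      rw [show pvLens run [] = [run] from by simp [pvLens, hr]]
      by_cases h : g.length ≤ idx ∨ PySem.List.pyGetD g (idx : Int) 0 ≠ run
      · simp only [pvChk, if_pos h]
      · simp only [pvChk, if_neg h, pvBLoop]
    · push_neg at hr
      rw [show pvBLoop g ['.'] idx run = pvBLoop g [] idx run from by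
          simp only [pvBLoop, reduceIte, hr]; simp]
      rw [show pvLens run [] = [] from by simp [pvLens, hr]]
      rfl
  | cons c cs ih =>
    intro idx run
    by_cases hc : c = '.'
    · subst hc
      by_cases hr : run ≠ 0
      · rw [show pvBLoop g (('.' :: cs) ++ ['.']) idx run
            = (if g.length ≤ idx ∨ PySem.List.pyGetD g (idx : Int) 0 ≠ run then false
               else pvBLoop g (cs ++ ['.']) (idx + 1) 0) from by
            simp only [List.cons_append, pvBLoop, reduceIte, if_pos hr]]
        rw [show pvLens run ('.' :: cs) = run :: pvLens 0 cs from by simp [pvLens, hr]]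
        by_cases h : g.length ≤ idx ∨ PySem.List.pyGetD g (idx : Int) 0 ≠ run
        · simp only [pvChk, if_pos h]
        · simp only [pvChk, if_neg h, ih]
      · push_neg at hr
        rw [show pvBLoop g (('.' :: cs) ++ ['.']) idx run = pvBLoop g (cs ++ ['.']) idx run from by
            simp only [List.cons_append, pvBLoop, reduceIte, hr]; simp]
        rw [show pvLens run ('.' :: cs) = pvLens 0 cs from by simp [pvLens, hr]]
        subst hr
        exact ih idx 0
    · rw [show pvBLoop g ((c :: cs) ++ ['.']) idx run = pvBLoop g (cs ++ ['.']) idx (run + 1) from by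
          simp only [List.cons_append, pvBLoop, if_neg hc]]
      rw [show pvLens run (c :: cs) = pvLens (run + 1) cs from by simp [pvLens, hc]]
      exact ih idx (run + 1)

lemma pvChk_eq_decide (g : List Int) (L : List Int) : ∀ (idx : Nat), idx ≤ g.length →
    pvChk g idx L = decide (g.drop idx = L) := by
  induction L with
  | nil =>
    intro idx h
    show decide ((idx : Int) = (g.length : Int)) = decide (g.drop idx = [])
    rw [decide_eq_decide]
    rw [List.drop_eq_nil_iff]
    constructor
    · intro he; exact_mod_cast le_of_eq he.symm
    · intro hle; exact_mod_cast le_antisymm h hle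
  | cons l ls ih =>
    intro idx h
    show (if g.length ≤ idx ∨ PySem.List.pyGetD g (idx : Int) 0 ≠ l then false
          else pvChk g (idx + 1) ls) = _
    by_cases hlt : g.length ≤ idx
    · have h2 : g.drop idx = [] := List.drop_eq_nil_iff.mpr hlt
      rw [if_pos (Or.inl hlt), h2]
      simp
    · push_neg at hlt
      have hdrop : g.drop idx = g[idx] :: g.drop (idx + 1) := List.drop_eq_getElem_cons hlt
      have hget : PySem.List.pyGetD g (idx : Int) 0 = g[idx] := by
        rw [PySem.List.pyGetD_natCast]
        exact List.getD_eq_getElem g 0 hlt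
      by_cases hv : g[idx] = l
      · rw [if_neg (by
          rw [hget]
          exact fun hor => hor.elim (fun hle => absurd hle (by omega)) (fun hne => hne hv))]
        rw [ih (idx + 1) (by omega), hdrop, hv, decide_eq_decide]
        constructor
        · intro he; rw [he]
        · intro he; exact (List.cons.injEq _ _ _ _ ▸ he).2
      · rw [if_pos (Or.inr (by rw [hget]; exact hv))]
        have hne : g.drop idx ≠ l :: ls := by
          rw [hdrop]; intro he; exact hv (List.cons.injEq _ _ _ _ ▸ he).1
        simp [hne]

lemma pvALoop_eq_decide (g : List Int) (df : List (List Char)) (ps : List (Int × Int)) :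
    pvALoop g df ps
      = decide (∀ p ∈ ps, ((PySem.List.pyGetD df p.1 []).length : Int) = PySem.List.pyGetD g p.1 0) := by
  induction ps with
  | nil =>
    show true = _
    simp
  | cons p ps ih =>
    obtain ⟨i, v⟩ := p
    simp only [pvALoop]
    split_ifs with h
    · symm
      rw [decide_eq_false_iff_not]
      intro hall
      exact h (hall (i, v) (List.mem_cons_self ..))
    · push_neg at h
      rw [ih]
      simp [h]

-- A's filtered-list comparison equals list equality with the mapped lengths
lemma pvA_decide (g : List Int) (df : List (List Char)) (hlen : g.length = df.length) :
    pvALoop g df (PySem.List.enumerate g 0) = decide (g = df.map pvLenInt) := by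
  rw [pvALoop_eq_decide, decide_eq_decide]
  constructor
  · intro hall
    apply List.ext_getElem (by simp [hlen])
    intro k hk1 hk2
    have hmem : ((0 : Int) + k, g[k]) ∈ PySem.List.enumerate g 0 := by
      rw [PySem.List.mem_enumerate_iff]; exact ⟨k, hk1, rfl⟩
    have hthis := hall _ hmem
    simp only [zero_add, PySem.List.pyGetD_natCast] at hthis
    have hk' : k < df.length := by simpa using hk2
    rw [List.getD_eq_getElem df [] hk', List.getD_eq_getElem g 0 hk1] at hthis
    simp only [List.getElem_map, pvLenInt]
    exact hthis.symm
  · intro hEq p hp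
    rw [PySem.List.mem_enumerate_iff] at hp
    obtain ⟨k, hk, rfl⟩ := hp
    simp only [zero_add, PySem.List.pyGetD_natCast]
    have hk' : k < df.length := by omega
    rw [List.getD_eq_getElem df [] hk', List.getD_eq_getElem g 0 hk]
    have : g[k] = (df.map pvLenInt)[k]'(by simpa using hk') := by
      exact List.getElem_of_eq hEq hk
    rw [this]
    simp [pvLenInt]

-- ===== VERDICT (by name: the statement is the Claim_ definition above) =====
theorem verify_data_spec : Claim_equal_verify_data := by
  intro data groups _ _
  unfold Spec_verify_data verify_data verify_data_alt
  cases hg : pvParseInts (PySem.Chars.splitOn groups.toList [',']) with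
  | none => rfl
  | some g =>
    simp only []
    rw [PySem.List.foldl_append_ite_eq_filter, pvSplitOn_dot]
    rw [pvBLoop_eq_chk, pvChk_eq_decide g _ 0 (by omega), pvLens_zero, ← pvSplitOn_dot, pvSplitOn_dot]
    set df := (pvSplitDot data.toList).filter (fun x => decide (1 ≤ x.length)) with hdf
    by_cases hlen : g.length = df.length
    · rw [if_neg (by exact_mod_cast fun h => (h : ¬ _) (by exact_mod_cast hlen))]
      simp only [List.nil_append]
      rw [pvA_decide g df hlen]
      simp
    · rw [if_pos (by exact_mod_cast hlen)]
      have : g ≠ df.map pvLenInt := by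
        intro h; apply hlen; rw [h, List.length_map]
      simp [this]
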